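-- pv_equiv track=rewrite | github.com/AdityaYulis/rag-project | app/rag.py | trim_context
-- ===== SOURCE A (Python) =====
-- from typing import List, Tuple
--
-- def trim_context(contexts: List[str], max_chars: int = 2500, max_chunks: int = 3) -> List[str]:
--     trimmed = []
--     total = 0
--
--     for ctx in contexts[:max_chunks]:
--         if total + len(ctx) > max_chars:
--             break
--         trimmed.append(ctx)
--         total += len(ctx)
--
--     return trimmed
-- ===== SOURCE B (Python) =====
-- def trim_context(contexts, max_chars=2500, max_chunks=3):
--     heads = contexts[:max_chunks]
--     # prefix sums of chunk lengths
--     sums = []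
--     total = 0
--     for c in heads:
--         total += len(c)
--         sums.append(total)
--     # binary search: first index whose prefix sum exceeds max_chars
--     lo, hi = 0, len(sums)
--     while lo < hi:
--         mid = (lo + hi) // 2
--         if sums[mid] <= max_chars:
--             lo = mid + 1
--         else:
--             hi = mid
--     return heads[:lo]
-- ===== Notes on version B (the rewrite author's own statement) =====
-- stated objective: alternative
-- what changed: Replaces the accumulate-and-break scan with building a prefix-sum array and binary-searching it for the first prefix sum exceeding max_chars, then slicing that many leading chunks.
import Mathlib
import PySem

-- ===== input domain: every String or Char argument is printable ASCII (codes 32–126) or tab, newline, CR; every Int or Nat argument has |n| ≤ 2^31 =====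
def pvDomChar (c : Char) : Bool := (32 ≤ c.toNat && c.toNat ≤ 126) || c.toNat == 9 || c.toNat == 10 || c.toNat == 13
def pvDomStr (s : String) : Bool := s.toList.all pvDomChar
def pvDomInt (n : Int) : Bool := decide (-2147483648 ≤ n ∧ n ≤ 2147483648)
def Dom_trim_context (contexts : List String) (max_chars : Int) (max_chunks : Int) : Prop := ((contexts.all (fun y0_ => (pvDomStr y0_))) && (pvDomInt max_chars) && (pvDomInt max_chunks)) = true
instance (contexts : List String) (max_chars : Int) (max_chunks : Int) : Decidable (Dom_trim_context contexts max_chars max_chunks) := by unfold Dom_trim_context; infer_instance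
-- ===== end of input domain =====

-- B replaces A's accumulate-and-break scan by a prefix-sum array plus a binary search
-- for the last prefix sum within the budget (objective: alternative decomposition).

-- ===== PORT A =====
-- the for-loop with its early 'break', carrying the running total
def trimLoopA (cs : List String) (total : Int) (max_chars : Int) : List String :=
  match cs with
  | [] => []
  | c :: rest =>
    if total + (PySem.Str.len c) > max_chars then []
    else c :: trimLoopA rest (total + PySem.Str.len c) max_chars

def trim_context (contexts : List String) (max_chars : Int) (max_chunks : Int) : List String :=
  trimLoopA (PySem.List.slice contexts none (some max_chunks)) 0 max_chars

-- ===== PORT B =====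
-- the prefix-sum loop: sums.append(total) with total += len(c)
def prefixSumsB (cs : List String) (total : Int) : List Int :=
  match cs with
  | [] => []
  | c :: rest => (total + PySem.Str.len c) :: prefixSumsB rest (total + PySem.Str.len c)

-- the binary-search while-loop; sums[mid] is always in range (0 ≤ lo ≤ mid < hi ≤ len sums)
def bsearchB (sums : List Int) (max_chars : Int) (lo hi : Nat) : Nat :=
  if h : lo < hi then
    let mid := (lo + hi) / 2
    if sums.getD mid 0 ≤ max_chars then bsearchB sums max_chars (mid + 1) hi
    else bsearchB sums max_chars lo mid
  else lo
termination_by hi - lo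
decreasing_by all_goals omega

def trim_context_alt (contexts : List String) (max_chars : Int) (max_chunks : Int) : List String :=
  let heads := PySem.List.slice contexts none (some max_chunks)
  let sums := prefixSumsB heads 0
  let lo := bsearchB sums max_chars 0 sums.length
  heads.take lo

-- ===== PRECONDITION & SPEC =====
def Spec_trim_context (contexts : List String) (max_chars : Int) (max_chunks : Int) (out : List String) : Prop := out = trim_context_alt contexts max_chars max_chunks
instance (contexts : List String) (max_chars : Int) (max_chunks : Int) (out : List String) : Decidable (Spec_trim_context contexts max_chars max_chunks out) := by unfold Spec_trim_context; infer_instance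

-- ===== CLAIM (what is proved, stated in full; the proofs are below) =====
def Claim_equal_trim_context : Prop := ∀ (contexts : List String) (max_chars : Int) (max_chunks : Int), Dom_trim_context contexts max_chars max_chunks → Spec_trim_context contexts max_chars max_chunks (trim_context contexts max_chars max_chunks)

-- ===== LEMMAS AND PROOFS =====

-- greedy count: number of leading prefix sums ≤ max_chars up to the first excess
def cnt (l : List Int) (mc : Int) : Nat :=
  match l with
  | [] => 0
  | x :: xs => if mc < x then 0 else cnt xs mc + 1

theorem cnt_le_length (l : List Int) (mc : Int) : cnt l mc ≤ l.length := by
  induction l with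
  | nil => simp [cnt]
  | cons x xs ih =>
    simp only [cnt, List.length_cons]
    split <;> omega

theorem cnt_lt (l : List Int) (mc : Int) (i : Nat) (hi : i < cnt l mc) :
    l.getD i 0 ≤ mc := by
  induction l generalizing i with
  | nil => simp [cnt] at hi
  | cons x xs ih =>
    simp only [cnt] at hi
    split at hi
    · omega
    · cases i with
      | zero => simpa using by omega
      | succ j => simpa using ih j (by omega)

theorem cnt_at (l : List Int) (mc : Int) (h : cnt l mc < l.length) :
    mc < l.getD (cnt l mc) 0 := by
  induction l with
  | nil => simp at h
  | cons x xs ih =>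
    by_cases hx : mc < x
    · simp [cnt, hx]
    · have h' : cnt xs mc < xs.length := by
        simp only [cnt, if_neg hx, List.length_cons] at h; omega
      simpa [cnt, hx] using ih h'

theorem prefixSums_mem_ge (cs : List String) (total : Int) (x : Int)
    (hx : x ∈ prefixSumsB cs total) : total ≤ x := by
  induction cs generalizing total with
  | nil => simp [prefixSumsB] at hx
  | cons c rest ih =>
    simp only [prefixSumsB, List.mem_cons] at hx
    have hlen : (0 : Int) ≤ PySem.Str.len c := by simp
    rcases hx with h | h
    · omega
    · have := ih (total + PySem.Str.len c) h; omega

theorem prefixSums_pairwise (cs : List String) (total : Int) :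
    (prefixSumsB cs total).Pairwise (· ≤ ·) := by
  induction cs generalizing total with
  | nil => simp [prefixSumsB]
  | cons c rest ih =>
    simp only [prefixSumsB, List.pairwise_cons]
    exact ⟨fun x hx => prefixSums_mem_ge _ _ _ hx, ih _⟩

theorem pairwise_getD_le (l : List Int) (hp : l.Pairwise (· ≤ ·)) (i j : Nat)
    (hij : i ≤ j) (hj : j < l.length) : l.getD i 0 ≤ l.getD j 0 := by
  rcases eq_or_lt_of_le hij with rfl | hlt
  · exact le_refl _
  · have := List.pairwise_iff_getElem.mp hp i j (by omega) hj hlt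
    rw [List.getD_eq_getElem l 0 (by omega), List.getD_eq_getElem l 0 hj]
    exact this

-- binary-search correctness on a nondecreasing list: it returns the greedy count
theorem bsearch_eq_cnt (l : List Int) (mc : Int) (hp : l.Pairwise (· ≤ ·))
    (lo hi : Nat) (hlo : lo ≤ cnt l mc) (hhi : cnt l mc ≤ hi) (hn : hi ≤ l.length) :
    bsearchB l mc lo hi = cnt l mc := by
  by_cases h : lo < hi
  · rw [bsearchB, dif_pos h]
    set mid := (lo + hi) / 2 with hmid
    have hmlt : mid < l.length := by omega
    by_cases hv : l.getD mid 0 ≤ mc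
    · rw [if_pos hv]
      have : mid < cnt l mc := by
        by_contra hc
        push Not at hc
        have h1 : cnt l mc < l.length := by omega
        have h2 := cnt_at l mc h1
        have h3 := pairwise_getD_le l hp (cnt l mc) mid hc hmlt
        omega
      exact bsearch_eq_cnt l mc hp (mid + 1) hi (by omega) hhi hn
    · rw [if_neg hv]
      have : cnt l mc ≤ mid := by
        by_contra hc
        push Not at hc
        exact hv (cnt_lt l mc mid hc)
      exact bsearch_eq_cnt l mc hp lo mid hlo this (by omega)
  · rw [bsearchB, dif_neg h]; omega
termination_by hi - lo
decreasing_by all_goals omega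

-- A's loop takes exactly the first (cnt of the prefix sums) chunks
theorem trimLoopA_eq_take (cs : List String) (total mc : Int) :
    trimLoopA cs total mc = cs.take (cnt (prefixSumsB cs total) mc) := by
  induction cs generalizing total with
  | nil => simp [trimLoopA, prefixSumsB, cnt]
  | cons c rest ih =>
    simp only [trimLoopA, prefixSumsB, cnt]
    by_cases h : total + PySem.Str.len c > mc
    · rw [if_pos h, if_pos (by omega)]
      simp
    · rw [if_neg h, if_neg (by omega)]
      simp [List.take_succ_cons, ih]

-- ===== VERDICT (by name: the statement is the Claim_ definition above) =====
theorem trim_context_spec : Claim_equal_trim_context := by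
  intro contexts max_chars max_chunks _
  unfold Spec_trim_context trim_context trim_context_alt
  show trimLoopA (PySem.List.slice contexts none (some max_chunks)) 0 max_chars =
    List.take
      (bsearchB (prefixSumsB (PySem.List.slice contexts none (some max_chunks)) 0) max_chars 0
        (prefixSumsB (PySem.List.slice contexts none (some max_chunks)) 0).length)
      (PySem.List.slice contexts none (some max_chunks))
  rw [trimLoopA_eq_take,
    bsearch_eq_cnt _ max_chars (prefixSums_pairwise _ 0) 0 _
      (by omega) (cnt_le_length _ _) (le_refl _)]
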